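-- pv_equiv track=rewrite | github.com/giaosudau/sqlflow | sqlflow/core/executors/v2/variables/substitution.py | _substitute_dollar_variable
-- ===== SOURCE A (Python) =====
-- def _substitute_dollar_variable(text: str, key: str, str_value: str) -> str:
--     """Substitute $variable syntax with boundary checking."""
--     dollar_placeholder = f"${key}"
--
--     if dollar_placeholder not in text:
--         return text
--
--     # Split on the placeholder and rejoin with value,
--     # but be careful with boundaries
--     parts = text.split(dollar_placeholder)
--     if len(parts) <= 1:
--         return text
--
--     new_parts = [parts[0]]
--     for i in range(1, len(parts)):
--         # Check if this is a word boundary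
--         # (next char is not alphanumeric or _)
--         if _is_word_boundary(parts[i]):
--             new_parts.append(str_value + parts[i])
--         else:
--             new_parts.append(dollar_placeholder + parts[i])
--
--     return "".join(new_parts)
--
-- def _is_word_boundary(text_after: str) -> bool:
--     """Check if the text represents a word boundary."""
--     return not text_after or (not text_after[0].isalnum() and text_after[0] != "_")
-- ===== SOURCE B (Python) =====
-- def _substitute_dollar_variable(text: str, key: str, str_value: str) -> str:
--     """Streaming character automaton: one pass over the characters keeping a
--     pending partial-match buffer; no split/find/string-search calls."""
--     placeholder = "$" + key
--     out = []
--     buf = ""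
--     for c in text:
--         if buf == placeholder:
--             if not c.isalnum() and c != "_":
--                 out.append(str_value)
--             else:
--                 out.append(placeholder)
--             buf = ""
--         buf += c
--         while buf and not placeholder.startswith(buf):
--             out.append(buf[0])
--             buf = buf[1:]
--     if buf == placeholder:
--         out.append(str_value)
--     else:
--         out.append(buf)
--     return "".join(out)
-- ===== Notes on version B (the rewrite author's own statement) =====
-- stated objective: alternative
-- what changed: Replaces split-on-placeholder + rejoin of a parts list with a streaming character automaton: one for-loop over the characters maintaining a pending partial-match buffer that is flushed or substituted, with no split/find/string-search calls.
import Mathlib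
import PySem

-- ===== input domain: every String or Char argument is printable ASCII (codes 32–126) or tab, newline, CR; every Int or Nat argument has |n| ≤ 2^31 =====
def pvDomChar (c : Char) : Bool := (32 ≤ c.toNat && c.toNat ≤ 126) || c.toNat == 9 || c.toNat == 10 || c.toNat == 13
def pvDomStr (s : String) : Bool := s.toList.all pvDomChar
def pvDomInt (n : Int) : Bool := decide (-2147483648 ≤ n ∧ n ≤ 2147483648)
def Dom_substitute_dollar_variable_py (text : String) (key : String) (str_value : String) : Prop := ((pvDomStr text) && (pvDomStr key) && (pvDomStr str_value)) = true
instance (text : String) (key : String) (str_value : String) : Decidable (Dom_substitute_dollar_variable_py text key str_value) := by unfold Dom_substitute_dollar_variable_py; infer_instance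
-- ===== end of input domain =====

-- B replaces A's split-on-placeholder + rejoin with a streaming character automaton:
-- one pass over the characters keeping a pending partial-match buffer, with no
-- split/find/string-search calls (objective: alternative algorithm, same behaviour).


-- ===== PORT A =====

-- helper `_is_word_boundary`
def is_word_boundary_py (text_after : List Char) : Bool :=
  match text_after with
  | [] => true
  | c :: _ => !(PySem.Chars.isalnum c) && c != '_'

def substitute_dollar_variable_py (text : String) (key : String) (str_value : String) : String :=
  -- dollar_placeholder = f"${key}"
  let dollar_placeholder : List Char := '$' :: key.toList
  -- if dollar_placeholder not in text: return text
  if PySem.Chars.isIn dollar_placeholder text.toList = false then text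
  else
    -- parts = text.split(dollar_placeholder)
    let parts := PySem.Chars.splitOn text.toList dollar_placeholder
    if parts.length ≤ 1 then text
    else
      -- new_parts = [parts[0]]; for i in range(1, len(parts)): append one decorated part
      let new_parts := (PySem.List.pyRange 1 (parts.length : Int) 1).foldl
        (fun np i =>
          np ++ [if is_word_boundary_py (PySem.List.pyGetD parts i []) then
                   str_value.toList ++ PySem.List.pyGetD parts i []
                 else
                   dollar_placeholder ++ PySem.List.pyGetD parts i []])
        [PySem.List.pyGetD parts 0 []]
      -- return "".join(new_parts)
      String.ofList (PySem.Chars.join [] new_parts)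

-- ===== PORT B =====

-- the inner `while buf and not placeholder.startswith(buf): out.append(buf[0]); buf = buf[1:]`
def pvPopB (ph : List Char) (out buf : List Char) : List Char × List Char :=
  match buf with
  | [] => (out, [])
  | d :: tl => if (d :: tl).isPrefixOf ph then (out, d :: tl) else pvPopB ph (out ++ [d]) tl

-- the `for c in text` loop of B carrying (out, buf), plus the trailing flush
def pvLoopB (ph v : List Char) : List Char → List Char → List Char → List Char
  | out, buf, [] => if buf == ph then out ++ v else out ++ buf
  | out, buf, c :: s =>
      let st :=
        if buf == ph then
          (out ++ (if !(PySem.Chars.isalnum c) && c != '_' then v else ph), ([] : List Char))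
        else (out, buf)
      let st2 := pvPopB ph st.1 (st.2 ++ [c])
      pvLoopB ph v st2.1 st2.2 s

def substitute_dollar_variable_py_alt (text : String) (key : String) (str_value : String) : String :=
  String.ofList (pvLoopB ('$' :: key.toList) str_value.toList [] [] text.toList)

-- ===== PRECONDITION & SPEC =====
def Spec_substitute_dollar_variable_py (text : String) (key : String) (str_value : String) (out : String) : Prop := out = substitute_dollar_variable_py_alt text key str_value
instance (text : String) (key : String) (str_value : String) (out : String) : Decidable (Spec_substitute_dollar_variable_py text key str_value out) := by unfold Spec_substitute_dollar_variable_py; infer_instance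

-- ===== CLAIM (what is proved, stated in full; the proofs are below) =====
def Claim_equal_substitute_dollar_variable_py : Prop := ∀ (text : String) (key : String) (str_value : String), Dom_substitute_dollar_variable_py text key str_value → Spec_substitute_dollar_variable_py text key str_value (substitute_dollar_variable_py text key str_value)

-- ===== LEMMAS AND PROOFS =====

-- common reduct of both programs: a character-level substitution recursion
def pvSpecFn (key v : List Char) : List Char → List Char
  | [] => []
  | c :: rest =>
    if ('$' :: key).isPrefixOf (c :: rest) then
      (if is_word_boundary_py ((c :: rest).drop (key.length + 1)) then v else '$' :: key)
        ++ pvSpecFn key v ((c :: rest).drop (key.length + 1))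
    else c :: pvSpecFn key v rest
termination_by s => s.length
decreasing_by
  all_goals simp only [List.length_drop, List.length_cons]
  all_goals omega

theorem pv_modifyHead_eta {α : Type} (l : List α) : List.modifyHead (fun x => x) l = l := by
  cases l <;> simp

theorem pv_go_ne_nil (sep : List Char) (fuel : Nat) :
    ∀ (l cur : List Char) (acc : List (List Char)), PySem.Chars.splitOn.go sep fuel l cur acc ≠ [] := by
  induction fuel with
  | zero => intro l cur acc; simp [PySem.Chars.splitOn.go]
  | succ fuel ih =>
    intro l cur acc
    cases l with
    | nil => simp [PySem.Chars.splitOn.go]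
    | cons c rest =>
      by_cases hp : sep.isPrefixOf (c :: rest) = true
      · simp only [PySem.Chars.splitOn.go, hp, if_pos]; exact ih _ _ _
      · simp only [PySem.Chars.splitOn.go, hp, if_neg, Bool.false_eq_true, not_false_iff]
        exact ih _ _ _

theorem pv_splitOn_ne_nil (l sep : List Char) : PySem.Chars.splitOn l sep ≠ [] :=
  pv_go_ne_nil sep _ l [] []

theorem pv_split_nil (sep : List Char) : PySem.Chars.splitOn [] sep = [[]] := by
  simp [PySem.Chars.splitOn, PySem.Chars.splitOn.go]

theorem pv_go_inv (sep : List Char) (hsep : sep ≠ []) :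
    ∀ (n : Nat) (l : List Char), l.length ≤ n → ∀ (fuel : Nat), l.length < fuel →
      ∀ (cur : List Char) (acc : List (List Char)),
      PySem.Chars.splitOn.go sep fuel l cur acc =
        acc.reverse ++ (PySem.Chars.splitOn l sep).modifyHead (cur.reverse ++ ·) := by
  have hsl : 0 < sep.length := List.length_pos_iff.mpr hsep
  intro n
  induction n with
  | zero =>
    intro l hl fuel hf cur acc
    have : l = [] := List.eq_nil_of_length_eq_zero (Nat.le_zero.mp hl)
    subst this
    obtain ⟨fuel, rfl⟩ : ∃ m, fuel = m + 1 := ⟨fuel - 1, by omega⟩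
    simp [PySem.Chars.splitOn.go, pv_split_nil]
  | succ n ih =>
    intro l hl fuel hf cur acc
    obtain ⟨fuel, rfl⟩ : ∃ m, fuel = m + 1 := ⟨fuel - 1, by omega⟩
    cases l with
    | nil => simp [PySem.Chars.splitOn.go, pv_split_nil]
    | cons c rest =>
      by_cases hp : sep.isPrefixOf (c :: rest) = true
      · have hdl : ((c :: rest).drop sep.length).length ≤ n := by
          simp only [List.length_drop, List.length_cons]
          simp only [List.length_cons] at hl; omega
        have hstep : PySem.Chars.splitOn.go sep (fuel + 1) (c :: rest) cur acc =
            PySem.Chars.splitOn.go sep fuel ((c :: rest).drop sep.length) [] (cur.reverse :: acc) := by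
          simp [PySem.Chars.splitOn.go, hp]
        have hS : PySem.Chars.splitOn (c :: rest) sep =
            [] :: PySem.Chars.splitOn ((c :: rest).drop sep.length) sep := by
          show PySem.Chars.splitOn.go sep ((c :: rest).length + 1) (c :: rest) [] [] = _
          have h1 : PySem.Chars.splitOn.go sep ((c :: rest).length + 1) (c :: rest) [] [] =
              PySem.Chars.splitOn.go sep ((c :: rest).length) ((c :: rest).drop sep.length) [] [[]] := by
            simp [PySem.Chars.splitOn.go, hp]
          rw [h1, ih _ hdl _ (by simp only [List.length_drop, List.length_cons]; omega) [] [[]]]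
          simp [pv_modifyHead_eta]
        rw [hstep, ih _ hdl _ (by simp only [List.length_drop, List.length_cons] at *; omega) [] (cur.reverse :: acc), hS]
        simp [pv_modifyHead_eta]
      · have hrl : rest.length ≤ n := by simp only [List.length_cons] at hl; omega
        have hstep : PySem.Chars.splitOn.go sep (fuel + 1) (c :: rest) cur acc =
            PySem.Chars.splitOn.go sep fuel rest (c :: cur) acc := by
          simp [PySem.Chars.splitOn.go, hp]
        have hS : PySem.Chars.splitOn (c :: rest) sep =
            (PySem.Chars.splitOn rest sep).modifyHead (fun t => c :: t) := by
          show PySem.Chars.splitOn.go sep ((c :: rest).length + 1) (c :: rest) [] [] = _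
          have h1 : PySem.Chars.splitOn.go sep ((c :: rest).length + 1) (c :: rest) [] [] =
              PySem.Chars.splitOn.go sep ((c :: rest).length) rest [c] [] := by
            simp [PySem.Chars.splitOn.go, hp]
          rw [h1, ih _ hrl _ (by simp) [c] []]
          obtain ⟨p, ps, hpp⟩ := List.exists_cons_of_ne_nil (pv_splitOn_ne_nil rest sep)
          simp [hpp]
        rw [hstep, ih _ hrl _ (by simp only [List.length_cons] at hf; omega) (c :: cur) acc, hS]
        obtain ⟨p, ps, hpp⟩ := List.exists_cons_of_ne_nil (pv_splitOn_ne_nil rest sep)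
        simp [hpp]

theorem pv_split_pos (l sep : List Char) (hsep : sep ≠ []) (hp : sep <+: l) :
    PySem.Chars.splitOn l sep = [] :: PySem.Chars.splitOn (l.drop sep.length) sep := by
  have hsl : 0 < sep.length := List.length_pos_iff.mpr hsep
  cases l with
  | nil =>
    exact absurd (List.prefix_nil.mp hp) hsep
  | cons c rest =>
    have hp' : sep.isPrefixOf (c :: rest) = true := List.isPrefixOf_iff_prefix.mpr hp
    show PySem.Chars.splitOn.go sep ((c :: rest).length + 1) (c :: rest) [] [] = _
    have h1 : PySem.Chars.splitOn.go sep ((c :: rest).length + 1) (c :: rest) [] [] =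
        PySem.Chars.splitOn.go sep ((c :: rest).length) ((c :: rest).drop sep.length) [] [[]] := by
      simp [PySem.Chars.splitOn.go, hp']
    rw [h1, pv_go_inv sep hsep ((c :: rest).drop sep.length).length _ le_rfl _
      (by simp only [List.length_drop, List.length_cons]; omega) [] [[]]]
    simp [pv_modifyHead_eta]

theorem pv_split_neg (c : Char) (rest sep : List Char) (hsep : sep ≠ [])
    (hp : ¬ sep <+: (c :: rest)) :
    PySem.Chars.splitOn (c :: rest) sep = (PySem.Chars.splitOn rest sep).modifyHead (fun t => c :: t) := by
  have hp' : ¬ sep.isPrefixOf (c :: rest) = true := fun h => hp (List.isPrefixOf_iff_prefix.mp h)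
  show PySem.Chars.splitOn.go sep ((c :: rest).length + 1) (c :: rest) [] [] = _
  have h1 : PySem.Chars.splitOn.go sep ((c :: rest).length + 1) (c :: rest) [] [] =
      PySem.Chars.splitOn.go sep ((c :: rest).length) rest [c] [] := by
    simp [PySem.Chars.splitOn.go, hp']
  rw [h1, pv_go_inv sep hsep rest.length _ le_rfl _ (by simp) [c] []]
  obtain ⟨p, ps, hpp⟩ := List.exists_cons_of_ne_nil (pv_splitOn_ne_nil rest sep)
  simp [hpp]

theorem pv_bnd_head (key : List Char) (t : List Char) :
    is_word_boundary_py (PySem.Chars.splitOn t ('$' :: key)).headI = is_word_boundary_py t := by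
  cases t with
  | nil => simp [pv_split_nil, is_word_boundary_py]
  | cons c rest =>
    by_cases hp : ('$' :: key) <+: (c :: rest)
    · rw [pv_split_pos _ _ (List.cons_ne_nil _ _) hp]
      obtain ⟨t', ht⟩ := hp
      have hc : c = '$' := by
        have := congrArg (fun l => l.headI) ht
        simpa using this.symm
      subst hc
      simp [is_word_boundary_py]
      decide
    · rw [pv_split_neg _ _ _ (List.cons_ne_nil _ _) hp]
      obtain ⟨p, ps, hpp⟩ := List.exists_cons_of_ne_nil (pv_splitOn_ne_nil rest ('$' :: key))
      simp [hpp, is_word_boundary_py]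

theorem pv_specFn_id (key v : List Char) (s : List Char) (h : ¬ ('$' :: key) <:+: s) :
    pvSpecFn key v s = s := by
  induction s with
  | nil => simp [pvSpecFn]
  | cons c rest ih =>
    have h1 : ¬ ('$' :: key) <+: (c :: rest) := fun hh => h (List.infix_cons_iff.mpr (Or.inl hh))
    have h2 : ¬ ('$' :: key) <:+: rest := fun hh => h (List.infix_cons_iff.mpr (Or.inr hh))
    have hp : ¬ ('$' :: key).isPrefixOf (c :: rest) = true := fun hh =>
      h1 (List.isPrefixOf_iff_prefix.mp hh)
    rw [pvSpecFn, if_neg hp, ih h2]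

-- B-side correspondence: the pop loop preserves the character-level spec
theorem pv_popB_prefix (ph : List Char) :
    ∀ (buf out : List Char), (pvPopB ph out buf).2 <+: ph := by
  intro buf
  induction buf with
  | nil => intro out; simp [pvPopB]
  | cons d tl ih =>
    intro out
    by_cases hp : (d :: tl).isPrefixOf ph = true
    · rw [pvPopB, if_pos hp]; exact List.isPrefixOf_iff_prefix.mp hp
    · rw [pvPopB, if_neg hp]; exact ih _

theorem pv_popB_eq (key v : List Char) :
    ∀ (buf : List Char), buf.length ≤ ('$' :: key).length → ∀ (out s : List Char),
      (pvPopB ('$' :: key) out buf).1 ++ pvSpecFn key v ((pvPopB ('$' :: key) out buf).2 ++ s) =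
        out ++ pvSpecFn key v (buf ++ s) := by
  intro buf
  induction buf with
  | nil => intro _ out s; simp [pvPopB]
  | cons d tl ih =>
    intro hlen out s
    by_cases hp : (d :: tl).isPrefixOf ('$' :: key) = true
    · rw [pvPopB, if_pos hp]
    · rw [pvPopB, if_neg hp]
      have hnpre : ¬ ('$' :: key) <+: ((d :: tl) ++ s) := by
        intro hph
        have h1 : (d :: tl) <+: ((d :: tl) ++ s) := List.prefix_append _ _
        have h2 : (d :: tl) <+: ('$' :: key) :=
          List.prefix_of_prefix_length_le h1 hph hlen
        exact hp (List.isPrefixOf_iff_prefix.mpr h2)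
      have hnp' : ¬ ('$' :: key).isPrefixOf (d :: (tl ++ s)) = true := fun hh => by
        exact hnpre (by simpa using List.isPrefixOf_iff_prefix.mp hh)
      have hstep : pvSpecFn key v ((d :: tl) ++ s) = d :: pvSpecFn key v (tl ++ s) := by
        rw [List.cons_append, pvSpecFn, if_neg hnp']
      rw [hstep, ih (by simpa using Nat.le_of_succ_le hlen) (out ++ [d]) s]
      simp

theorem pv_specFn_at_ph (key v : List Char) (s : List Char) :
    pvSpecFn key v (('$' :: key) ++ s) =
      (if is_word_boundary_py s then v else '$' :: key) ++ pvSpecFn key v s := by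
  have hpre : ('$' :: key).isPrefixOf (('$' :: key) ++ s) = true :=
    List.isPrefixOf_iff_prefix.mpr (List.prefix_append _ _)
  have hdrop : (('$' :: key) ++ s).drop (key.length + 1) = s := by
    rw [show key.length + 1 = ('$' :: key).length by simp]
    exact List.drop_left
  rw [List.cons_append, pvSpecFn]
  rw [← List.cons_append, if_pos (by simpa using hpre)]
  simp only [← List.cons_append, hdrop]

theorem pv_loopB_core (key v : List Char) :
    ∀ (s out buf : List Char), buf <+: ('$' :: key) →
      pvLoopB ('$' :: key) v out buf s = out ++ pvSpecFn key v (buf ++ s) := by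
  intro s
  induction s with
  | nil =>
    intro out buf hbuf
    rw [pvLoopB]
    by_cases he : buf = '$' :: key
    · subst he
      rw [if_pos (by simp)]
      rw [List.append_nil, show ('$' :: key) = ('$' :: key) ++ [] by simp, pv_specFn_at_ph]
      simp [is_word_boundary_py, pvSpecFn]
    · rw [if_neg (by simpa using he)]
      have hlt : buf.length < ('$' :: key).length := by
        rcases Nat.lt_or_ge buf.length ('$' :: key).length with h | h
        · exact h
        · exact absurd (List.IsPrefix.eq_of_length_le hbuf h) he
      have hninf : ¬ ('$' :: key) <:+: buf := fun hinf => by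
        have := hinf.length_le; omega
      rw [List.append_nil, pv_specFn_id key v buf hninf]
  | cons c s ih =>
    intro out buf hbuf
    rw [pvLoopB]
    by_cases he : buf = '$' :: key
    · subst he
      simp only [if_pos (show ('$' :: key) == ('$' :: key) from by simp)]
      have hpop := pv_popB_eq key v [c] (by simp) (out ++ (if !(PySem.Chars.isalnum c) && c != '_' then v else '$' :: key)) s
      rw [ih _ _ (pv_popB_prefix _ _ _)]
      rw [show ([] : List Char) ++ [c] = [c] by rfl] at *
      rw [hpop]
      rw [show ('$' :: key) ++ c :: s = ('$' :: key) ++ ([c] ++ s) by simp, pv_specFn_at_ph]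
      have hb : is_word_boundary_py ([c] ++ s) = (!(PySem.Chars.isalnum c) && c != '_') := rfl
      rw [hb]
      simp
    · simp only [if_neg (show ¬ (buf == ('$' :: key)) = true from by simpa using he)]
      have hlt : buf.length < ('$' :: key).length := by
        rcases Nat.lt_or_ge buf.length ('$' :: key).length with h | h
        · exact h
        · exact absurd (List.IsPrefix.eq_of_length_le hbuf h) he
      have hpop := pv_popB_eq key v (buf ++ [c]) (by simp only [List.length_append, List.length_cons, List.length_nil] at hlt ⊢; omega) out s
      rw [ih _ _ (pv_popB_prefix _ _ _), hpop]
      simp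

theorem pv_loopB_eq_specFn (key v s : List Char) :
    pvLoopB ('$' :: key) v [] [] s = pvSpecFn key v s := by
  simpa using pv_loopB_core key v s [] [] (List.nil_prefix)

theorem pv_split_len2 (key : List Char) :
    ∀ (n : Nat) (l : List Char), l.length ≤ n → ('$' :: key) <:+: l →
      2 ≤ (PySem.Chars.splitOn l ('$' :: key)).length := by
  intro n
  induction n with
  | zero =>
    intro l hl hinf
    have : l = [] := by cases l with | nil => rfl | cons a t => simp at hl
    subst this
    exact absurd (List.eq_nil_of_infix_nil hinf) (List.cons_ne_nil _ _)
  | succ n ih =>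
    intro l hl hinf
    cases l with
    | nil => exact absurd (List.eq_nil_of_infix_nil hinf) (List.cons_ne_nil _ _)
    | cons c rest =>
      by_cases hp : ('$' :: key) <+: (c :: rest)
      · rw [pv_split_pos _ _ (List.cons_ne_nil _ _) hp]
        have := List.length_pos_iff.mpr
          (pv_splitOn_ne_nil ((c :: rest).drop ('$' :: key).length) ('$' :: key))
        simp only [List.length_cons] at this ⊢
        omega
      · have hinf' : ('$' :: key) <:+: rest := by
          rcases List.infix_cons_iff.mp hinf with h | h
          · exact absurd h hp
          · exact h
        rw [pv_split_neg _ _ _ (List.cons_ne_nil _ _) hp]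
        rw [List.length_modifyHead]
        exact ih rest (by simp only [List.length_cons] at hl; omega) hinf'

theorem pv_range_map (parts : List (List Char)) :
    ∀ (n : Nat) (k : Nat), parts.length - k ≤ n →
      (PySem.List.pyRange (k : Int) (parts.length : Int) 1).map
        (fun i => PySem.List.pyGetD parts i []) = parts.drop k := by
  intro n
  induction n with
  | zero =>
    intro k hk
    have hle : parts.length ≤ k := by omega
    have h1 : PySem.List.pyRange (k : Int) (parts.length : Int) 1 = [] := by
      simp [PySem.List.pyRange]; omega
    rw [h1, List.map_nil, List.drop_eq_nil_of_le hle]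
  | succ n ih =>
    intro k hk
    by_cases hle : parts.length ≤ k
    · have h1 : PySem.List.pyRange (k : Int) (parts.length : Int) 1 = [] := by
        simp [PySem.List.pyRange]; omega
      rw [h1, List.map_nil, List.drop_eq_nil_of_le hle]
    · have hlt : k < parts.length := by omega
      rw [PySem.List.pyRange_one_cons (by exact_mod_cast hlt)]
      rw [List.map_cons]
      rw [PySem.List.pyGetD_of_nonneg parts [] (by positivity)]
      rw [show ((k : Int) + 1) = (((k + 1 : Nat)) : Int) by push_cast; ring]
      rw [ih (k + 1) (by omega)]
      rw [List.drop_eq_getElem_cons hlt]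
      congr 1
      simp [List.getD_eq_getElem?_getD, List.getElem?_eq_getElem hlt]

theorem pv_A_core (key v : List Char) :
    ∀ (n : Nat) (l : List Char), l.length ≤ n →
      ∀ (p : List Char) (ps : List (List Char)),
      PySem.Chars.splitOn l ('$' :: key) = p :: ps →
      p ++ (ps.map (fun q => (if is_word_boundary_py q then v else '$' :: key) ++ q)).flatten =
        pvSpecFn key v l := by
  intro n
  induction n with
  | zero =>
    intro l hl p ps h
    have : l = [] := by cases l with | nil => rfl | cons a t => simp at hl
    subst this
    rw [pv_split_nil] at h
    obtain ⟨rfl, rfl⟩ : p = [] ∧ ps = [] := by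
      refine ⟨?_, ?_⟩ <;> injection h <;> simp_all
    simp [pvSpecFn]
  | succ n ih =>
    intro l hl p ps h
    cases l with
    | nil =>
      rw [pv_split_nil] at h
      obtain ⟨rfl, rfl⟩ : p = [] ∧ ps = [] := by
        refine ⟨?_, ?_⟩ <;> injection h <;> simp_all
      simp [pvSpecFn]
    | cons c rest =>
      by_cases hp : ('$' :: key) <+: (c :: rest)
      · rw [pv_split_pos _ _ (List.cons_ne_nil _ _) hp] at h
        simp only [List.length_cons] at h
        obtain ⟨p', ps', hS⟩ := List.exists_cons_of_ne_nil
          (pv_splitOn_ne_nil ((c :: rest).drop (key.length + 1)) ('$' :: key))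
        rw [hS] at h
        injection h with h1 h2
        subst h1; subst h2
        have hdl : ((c :: rest).drop (key.length + 1)).length ≤ n := by
          simp only [List.length_drop, List.length_cons]
          simp only [List.length_cons] at hl; omega
        have hIH := ih _ hdl p' ps' hS
        have hb : is_word_boundary_py p' =
            is_word_boundary_py ((c :: rest).drop (key.length + 1)) := by
          have hbb := pv_bnd_head key ((c :: rest).drop (key.length + 1))
          rw [hS] at hbb
          simpa using hbb
        rw [pvSpecFn, if_pos (List.isPrefixOf_iff_prefix.mpr hp)]
        simp only [List.nil_append, List.map_cons, List.flatten_cons]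
        rw [hb] at *
        rw [← hIH, List.append_assoc]
      · rw [pv_split_neg _ _ _ (List.cons_ne_nil _ _) hp] at h
        obtain ⟨p', ps', hS⟩ := List.exists_cons_of_ne_nil (pv_splitOn_ne_nil rest ('$' :: key))
        rw [hS] at h
        simp only [List.modifyHead] at h
        injection h with h1 h2
        subst h1; subst h2
        have hp' : ¬ ('$' :: key).isPrefixOf (c :: rest) = true := fun hh =>
          hp (List.isPrefixOf_iff_prefix.mp hh)
        rw [pvSpecFn, if_neg hp']
        rw [← ih rest (by simp only [List.length_cons] at hl; omega) p' ps' hS]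
        simp

theorem pv_join_nil_flatten (l : List (List Char)) : PySem.Chars.join [] l = l.flatten := by
  induction l with
  | nil => simp [PySem.Chars.join_nil]
  | cons a t ih =>
    cases t with
    | nil => simp [PySem.Chars.join, List.intercalate]
    | cons b u =>
      rw [PySem.Chars.join_cons_cons, List.flatten_cons, ← ih]
      simp

-- ===== VERDICT (by name: the statement is the Claim_ definition above) =====
theorem substitute_dollar_variable_py_spec : Claim_equal_substitute_dollar_variable_py := by
  intro text key str_value _dom
  unfold Spec_substitute_dollar_variable_py
  simp only [substitute_dollar_variable_py, substitute_dollar_variable_py_alt]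
  by_cases hin : PySem.Chars.isIn ('$' :: key.toList) text.toList = false
  · rw [if_pos hin, pv_loopB_eq_specFn,
      pv_specFn_id _ _ _ ((PySem.Chars.isIn_eq_false_iff _ _).mp hin), String.ofList_toList]
  · have hin' : PySem.Chars.isIn ('$' :: key.toList) text.toList = true := by
      cases hx : PySem.Chars.isIn ('$' :: key.toList) text.toList
      · exact absurd hx hin
      · rfl
    have hinf := (PySem.Chars.isIn_iff_infix _ _).mp hin'
    rw [if_neg (by simp [hin'])]
    have hlen2 := pv_split_len2 key.toList text.toList.length text.toList le_rfl hinf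
    rw [if_neg (by omega)]
    simp only [PySem.List.foldl_append_singleton_eq_map]
    have hrange : (PySem.List.pyRange 1 ((PySem.Chars.splitOn text.toList ('$' :: key.toList)).length : Int) 1).map
        (fun i => PySem.List.pyGetD (PySem.Chars.splitOn text.toList ('$' :: key.toList)) i []) =
        (PySem.Chars.splitOn text.toList ('$' :: key.toList)).drop 1 := by
      have := pv_range_map (PySem.Chars.splitOn text.toList ('$' :: key.toList))
        (PySem.Chars.splitOn text.toList ('$' :: key.toList)).length 1 (by omega)
      simpa using this
    have hfun : (fun i => if is_word_boundary_py (PySem.List.pyGetD (PySem.Chars.splitOn text.toList ('$' :: key.toList)) i []) then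
          str_value.toList ++ PySem.List.pyGetD (PySem.Chars.splitOn text.toList ('$' :: key.toList)) i []
        else ('$' :: key.toList) ++ PySem.List.pyGetD (PySem.Chars.splitOn text.toList ('$' :: key.toList)) i []) =
        ((fun q => (if is_word_boundary_py q then str_value.toList else '$' :: key.toList) ++ q) ∘
          (fun i => PySem.List.pyGetD (PySem.Chars.splitOn text.toList ('$' :: key.toList)) i [])) := by
      funext i
      by_cases hb : is_word_boundary_py (PySem.List.pyGetD (PySem.Chars.splitOn text.toList ('$' :: key.toList)) i []) <;>
        simp [hb, Function.comp]
    rw [hfun, ← List.map_map, hrange]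
    obtain ⟨p, ps, hps⟩ := List.exists_cons_of_ne_nil (pv_splitOn_ne_nil text.toList ('$' :: key.toList))
    rw [hps]
    have hget0 : PySem.List.pyGetD (p :: ps) (0 : Int) [] = p := by
      rw [PySem.List.pyGetD_of_nonneg _ _ le_rfl]; simp
    rw [hget0]
    simp only [List.drop_succ_cons, List.drop_zero]
    rw [pv_join_nil_flatten, pv_loopB_eq_specFn]
    congr 1
    rw [List.singleton_append, List.flatten_cons]
    exact pv_A_core key.toList str_value.toList text.toList.length text.toList le_rfl p ps hps
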